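-- pv_equiv track=rewrite | github.com/breverdbidder/foreclosure-auction-pipeline | utils/aggregator.py | _get_value_summary
-- ===== SOURCE A (Python) =====
-- from typing import List, Dict, Any
--
-- def _get_value_summary(records: List[Dict]) -> Dict[str, Any]:
--     """Get summary of property values"""
--     values = [r.get('market_value', 0) for r in records if r.get('market_value')]
--
--     if not values:
--         return {
--             'total': 0,
--             'average': 0,
--             'min': 0,
--             'max': 0
--         }
--
--     return {
--         'total': sum(values),
--         'average': sum(values) // len(values),
--         'min': min(values),
--         'max': max(values)
--     }
-- ===== SOURCE B (Python) =====
-- from typing import List, Dict, Any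
--
-- def _get_value_summary(records: List[Dict]) -> Dict[str, Any]:
--     """Get summary of property values (single pass with running aggregates)."""
--     count = 0
--     total = 0
--     cur_min = None
--     cur_max = None
--     for r in records:
--         v = r.get('market_value')
--         if not v:
--             continue
--         count += 1
--         total += v
--         cur_min = v if cur_min is None else min(cur_min, v)
--         cur_max = v if cur_max is None else max(cur_max, v)
--     if count == 0:
--         return {'total': 0, 'average': 0, 'min': 0, 'max': 0}
--     return {'total': total, 'average': total // count, 'min': cur_min, 'max': cur_max}
-- ===== Notes on version B (the rewrite author's own statement) =====
-- stated objective: alternative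
-- what changed: Replaces A's list comprehension plus four separate library scans (sum twice, min, max, len over the built values list) with one explicit pass over records maintaining running count/total/min/max and no intermediate list.
import Mathlib
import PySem

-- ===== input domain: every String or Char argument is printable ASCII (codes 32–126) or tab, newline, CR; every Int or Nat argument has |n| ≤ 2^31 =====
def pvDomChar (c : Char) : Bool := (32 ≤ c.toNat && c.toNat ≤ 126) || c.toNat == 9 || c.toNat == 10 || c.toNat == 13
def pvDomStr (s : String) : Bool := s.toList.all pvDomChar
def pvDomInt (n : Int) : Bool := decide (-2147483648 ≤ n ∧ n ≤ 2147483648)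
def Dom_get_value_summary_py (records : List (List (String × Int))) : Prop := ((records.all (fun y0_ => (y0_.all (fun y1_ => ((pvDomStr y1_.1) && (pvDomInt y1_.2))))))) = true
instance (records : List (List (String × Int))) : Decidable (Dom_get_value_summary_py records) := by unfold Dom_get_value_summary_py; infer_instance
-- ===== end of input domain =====

-- B replaces A's list comprehension plus separate sum/len/min/max scans with a single
-- explicit pass maintaining running count/total/min/max (alternative decomposition, no intermediate list; same cost).


-- ===== PORT A =====
-- r.get('market_value') is truthy iff the first binding of 'market_value' is a nonzero int
def pvTruthy (r : List (String × Int)) : Bool :=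
  match (PySem.Dict.mk r).get? "market_value" with
  | some v => v != 0
  | none => false

def get_value_summary_py (records : List (List (String × Int))) : List (String × Int) :=
  let values := (records.filter pvTruthy).map (fun r => (PySem.Dict.mk r).getD "market_value" 0)
  if values = [] then
    [("total", 0), ("average", 0), ("min", 0), ("max", 0)]
  else
    [("total", values.sum),
     ("average", PySem.Int.floordiv values.sum (values.length : Int)),
     ("min", (PySem.List.min? values (fun x => x)).getD 0),   -- getD unreachable: values ≠ []
     ("max", (PySem.List.max? values (fun x => x)).getD 0)]

-- ===== PORT B =====
-- the for-loop of Source B: state (count, total, cur_min, cur_max)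
def pvLoop : List (List (String × Int)) → Int → Int → Option Int → Option Int →
    Int × Int × Option Int × Option Int
  | [], c, t, mn, mx => (c, t, mn, mx)
  | r :: rs, c, t, mn, mx =>
    match (PySem.Dict.mk r).get? "market_value" with
    | none => pvLoop rs c t mn mx
    | some v =>
      if v = 0 then pvLoop rs c t mn mx
      else
        pvLoop rs (c + 1) (t + v)
          (some (match mn with | none => v | some m => min m v))
          (some (match mx with | none => v | some m => max m v))

def get_value_summary_py_alt (records : List (List (String × Int))) : List (String × Int) :=
  match pvLoop records 0 0 none none with
  | (c, t, mn, mx) =>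
    if c = 0 then
      [("total", 0), ("average", 0), ("min", 0), ("max", 0)]
    else
      [("total", t), ("average", PySem.Int.floordiv t c),
       ("min", mn.getD 0), ("max", mx.getD 0)]

-- ===== PRECONDITION & SPEC =====
def Spec_get_value_summary_py (records : List (List (String × Int))) (out : List (String × Int)) : Prop := out = get_value_summary_py_alt records
instance (records : List (List (String × Int))) (out : List (String × Int)) : Decidable (Spec_get_value_summary_py records out) := by unfold Spec_get_value_summary_py; infer_instance

-- ===== CLAIM (what is proved, stated in full; the proofs are below) =====
def Claim_equal_get_value_summary_py : Prop := ∀ (records : List (List (String × Int))), Dom_get_value_summary_py records → Spec_get_value_summary_py records (get_value_summary_py records)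

-- ===== LEMMAS AND PROOFS =====

-- the values list A builds
def pvVals (records : List (List (String × Int))) : List Int :=
  (records.filter pvTruthy).map (fun r => (PySem.Dict.mk r).getD "market_value" 0)

def pvMnStep (o : Option Int) (v : Int) : Option Int :=
  some (match o with | none => v | some m => min m v)

def pvMxStep (o : Option Int) (v : Int) : Option Int :=
  some (match o with | none => v | some m => max m v)

lemma pvLoop_spec (rs : List (List (String × Int))) :
    ∀ (c t : Int) (mn mx : Option Int),
    pvLoop rs c t mn mx =
      (c + (pvVals rs).length, t + (pvVals rs).sum,
       (pvVals rs).foldl pvMnStep mn, (pvVals rs).foldl pvMxStep mx) := by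
  induction rs with
  | nil => intro c t mn mx; simp [pvLoop, pvVals]
  | cons r rs ih =>
    intro c t mn mx
    simp only [pvLoop]
    cases hg : (PySem.Dict.mk r).get? "market_value" with
    | none =>
      have hT : pvTruthy r = false := by simp [pvTruthy, hg]
      simp [pvVals, hT] at *
      exact ih c t mn mx
    | some v =>
      by_cases hv : v = 0
      · have hT : pvTruthy r = false := by simp [pvTruthy, hg, hv]
        simp only [hv]
        simp [pvVals, hT] at *
        exact ih c t mn mx
      · have hT : pvTruthy r = true := by simp [pvTruthy, hg, hv]
        have hD : (PySem.Dict.mk r).getD "market_value" 0 = v := by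
          simp [PySem.Dict.getD_eq_get?_getD, hg]
        have hV : pvVals (r :: rs) = v :: pvVals rs := by
          simp [pvVals, hT, hD]
        simp only [if_neg hv]
        rw [ih, hV]
        simp only [List.length_cons, List.sum_cons, List.foldl_cons, pvMnStep, pvMxStep]
        refine congrArg₂ Prod.mk (by push_cast; ring) (congrArg₂ Prod.mk (by ring) rfl)

lemma pvFoldl_mnStep_some (vs : List Int) (m : Int) :
    vs.foldl pvMnStep (some m) = some (vs.foldl min m) := by
  induction vs generalizing m with
  | nil => rfl
  | cons v vs ih => simp [pvMnStep, ih]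

lemma pvFoldl_mxStep_some (vs : List Int) (m : Int) :
    vs.foldl pvMxStep (some m) = some (vs.foldl max m) := by
  induction vs generalizing m with
  | nil => rfl
  | cons v vs ih => simp [pvMxStep, ih]

-- ===== VERDICT (by name: the statement is the Claim_ definition above) =====
theorem get_value_summary_py_spec : Claim_equal_get_value_summary_py := by
  intro records _
  unfold Spec_get_value_summary_py
  unfold get_value_summary_py get_value_summary_py_alt
  rw [pvLoop_spec]
  cases hvs : pvVals records with
  | nil =>
    rw [show ((records.filter pvTruthy).map
        (fun r => (PySem.Dict.mk r).getD "market_value" 0)) = [] from hvs]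
    simp
  | cons v vs =>
    rw [show ((records.filter pvTruthy).map
        (fun r => (PySem.Dict.mk r).getD "market_value" 0)) = v :: vs from hvs]
    have hc : ¬ ((0 : Int) + (((v :: vs).length : Nat) : Int) = 0) := by
      simp only [List.length_cons]; push_cast; omega
    simp only [List.foldl_cons, pvMnStep, pvMxStep]
    rw [pvFoldl_mnStep_some, pvFoldl_mxStep_some,
        PySem.List.min?_id_cons, PySem.List.max?_id_cons]
    simp only [if_neg hc, if_neg (by simp : ¬ (v :: vs = []))]
    simp
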